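-- pv_equiv track=rewrite | github.com/franciscunha/aoc2025 | 1_secret_entrance.py | secret_entrance
-- ===== SOURCE A (Python) =====
-- def secret_entrance(input):
--     pos = 50
--     count = 0
--
--     for line in input.splitlines():
--         dir = line[0]
--         num = int(line[1:])
--
--         mod = 1 if dir == "R" else -1
--
--         pos += (num * mod)
--
--         if pos % 100 == 0:
--             count += 1
--
--     return count
-- ===== SOURCE B (Python) =====
-- def secret_entrance(input):
--     # Divide and conquer over the lines, tracking only the position's residue
--     # mod 100 (a hit is exactly residue 0): solve each half and add the counts.
--     def go(lines, residue):
--         if not lines: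
--             return (0, residue)
--         if len(lines) == 1:
--             line = lines[0]
--             delta = int(line[1:]) * (1 if line[0] == "R" else -1)
--             r = (residue + delta) % 100
--             return ((1 if r == 0 else 0), r)
--         mid = len(lines) // 2
--         c1, r1 = go(lines[:mid], residue)
--         c2, r2 = go(lines[mid:], r1)
--         return (c1 + c2, r2)
--     count, _ = go(input.splitlines(), 50)
--     return count
-- ===== Notes on version B (the rewrite author's own statement) =====
-- stated objective: alternative
-- what changed: Replaced the fused linear scan that accumulates the absolute position and a counter by a divide-and-conquer over the list of lines that tracks only the position's residue mod 100, solving each half recursively and summing the two half-counts.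
import Mathlib
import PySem

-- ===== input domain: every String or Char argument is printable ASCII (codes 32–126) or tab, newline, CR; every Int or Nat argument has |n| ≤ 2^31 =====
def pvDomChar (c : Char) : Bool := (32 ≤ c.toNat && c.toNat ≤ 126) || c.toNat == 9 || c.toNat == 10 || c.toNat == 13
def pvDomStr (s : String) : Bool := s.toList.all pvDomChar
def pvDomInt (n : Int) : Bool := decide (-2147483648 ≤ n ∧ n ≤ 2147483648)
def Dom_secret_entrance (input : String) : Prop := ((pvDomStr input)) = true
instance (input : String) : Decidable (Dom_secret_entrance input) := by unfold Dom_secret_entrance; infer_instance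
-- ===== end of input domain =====

-- B solves the task by divide and conquer over the lines, tracking only the position's
-- residue mod 100 and summing the counts of the two halves; same linear-scan A is replaced.

-- ===== PORT A =====
-- fused loop: per line, parse direction and number, update pos, bump count on a multiple of 100
def seLoop (lines : List String) (pos count : Int) : Int :=
  match lines with
  | [] => count
  | line :: rest =>
    let dir := (PySem.Str.pyGet? line 0).getD ' '      -- line[0]; Pre_ excludes the empty line (IndexError)
    let num := (PySem.Int.ofStr? (PySem.Str.slice line (some 1) none)).getD 0  -- int(line[1:]); Pre_ excludes ValueError
    let md : Int := if dir = 'R' then 1 else -1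
    let pos' := pos + num * md
    seLoop rest pos' (if PySem.Int.mod pos' 100 = 0 then count + 1 else count)

def secret_entrance (input : String) : Int :=
  seLoop (PySem.Str.splitlines input) 50 0

-- ===== PORT B =====
-- go(lines, residue): (number of hits, residue after all lines); divide and conquer
def goB : List String → Int → Int × Int
  | [], r => (0, r)
  | [line], r =>
      let delta := (PySem.Int.ofStr? (PySem.Str.slice line (some 1) none)).getD 0 *
        (if (PySem.Str.pyGet? line 0).getD ' ' = 'R' then (1 : Int) else -1)
      let r' := PySem.Int.mod (r + delta) 100
      ((if r' = 0 then (1 : Int) else 0), r')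
  | a :: b :: rest, r =>
      let lines := a :: b :: rest
      let mid := lines.length / 2
      let p1 := goB (lines.take mid) r
      let p2 := goB (lines.drop mid) p1.2
      (p1.1 + p2.1, p2.2)
  termination_by lines _ => lines.length
  decreasing_by
    · simp [List.length_take]; omega
    · simp [List.length_drop]; omega

def secret_entrance_alt (input : String) : Int :=
  (goB (PySem.Str.splitlines input) 50).1

-- ===== PRECONDITION & SPEC =====
-- Pre_ excludes exactly the inputs on which A raises: a line that is empty (IndexError on line[0])
-- or whose tail is not a valid int literal (ValueError in int(line[1:])).
def Pre_secret_entrance (input : String) : Prop :=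
  ∀ line ∈ PySem.Str.splitlines input,
    line ≠ "" ∧ (PySem.Int.ofStr? (PySem.Str.slice line (some 1) none)).isSome = true
instance (input : String) : Decidable (Pre_secret_entrance input) := by
  unfold Pre_secret_entrance; infer_instance
def pvWitness_secret_entrance : String := "R50"

def Spec_secret_entrance (input : String) (out : Int) : Prop := out = secret_entrance_alt input
instance (input : String) (out : Int) : Decidable (Spec_secret_entrance input out) := by unfold Spec_secret_entrance; infer_instance

-- ===== CLAIM =====
def Claim_equal_secret_entrance : Prop := ∀ (input : String), Dom_secret_entrance input → Pre_secret_entrance input → Spec_secret_entrance input (secret_entrance input)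

-- ===== LEMMAS AND PROOFS =====

-- a line's signed delta, as both ports compute it
def lineDelta (line : String) : Int :=
  (PySem.Int.ofStr? (PySem.Str.slice line (some 1) none)).getD 0 *
    (if (PySem.Str.pyGet? line 0).getD ' ' = 'R' then (1 : Int) else -1)

def finalPos (lines : List String) (pos : Int) : Int :=
  lines.foldl (fun p line => p + lineDelta line) pos

lemma seLoop_shift (lines : List String) (pos c : Int) :
    seLoop lines pos c = c + seLoop lines pos 0 := by
  induction lines generalizing pos c with
  | nil => simp [seLoop]
  | cons line rest ih =>
    simp only [seLoop]
    split_ifs <;> first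
      | (rw [ih _ (0 + 1), ih _ (c + 1)]; ring)
      | exact ih _ c

lemma seLoop_append (l1 l2 : List String) (pos : Int) :
    seLoop (l1 ++ l2) pos 0 = seLoop l1 pos 0 + seLoop l2 (finalPos l1 pos) 0 := by
  induction l1 generalizing pos with
  | nil => simp [seLoop, finalPos]
  | cons line rest ih =>
    simp only [List.cons_append, seLoop, finalPos, List.foldl_cons]
    have hd : pos + (PySem.Int.ofStr? (PySem.Str.slice line (some 1) none)).getD 0 *
        (if (PySem.Str.pyGet? line 0).getD ' ' = 'R' then (1 : Int) else -1)
        = pos + lineDelta line := rfl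
    rw [hd]
    split_ifs with h
    · rw [seLoop_shift (rest ++ l2) _ (0+1), seLoop_shift rest _ (0+1), ih, finalPos]; ring
    · exact ih _

lemma mod_residue (pos d : Int) :
    PySem.Int.mod (PySem.Int.mod pos 100 + d) 100 = PySem.Int.mod (pos + d) 100 := by
  simp only [PySem.Int.mod_eq_emod_of_pos (show (0:Int) < 100 by norm_num)]
  omega

lemma goB_spec (lines : List String) (r : Int) :
    ∀ pos : Int, r = PySem.Int.mod pos 100 →
    goB lines r = (seLoop lines pos 0, PySem.Int.mod (finalPos lines pos) 100) := by
  induction lines, r using goB.induct with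
  | case1 r => intro pos hr; simp [goB, seLoop, finalPos, hr]
  | case2 line r =>
    intro pos hr
    simp only [goB, seLoop, finalPos, List.foldl_cons, List.foldl_nil, hr]
    rw [mod_residue]
    have hd : pos + (PySem.Int.ofStr? (PySem.Str.slice line (some 1) none)).getD 0 *
        (if (PySem.Str.pyGet? line 0).getD ' ' = 'R' then (1 : Int) else -1)
        = pos + lineDelta line := rfl
    rw [hd]
    split_ifs with h <;> simp
  | case3 a b rest r _lines _mid _p1 ih1 _ih2 ih2 =>
    intro pos hr
    have h1 := ih1 pos hr
    have hp2 : _p1.2 = PySem.Int.mod (finalPos (List.take _mid _lines) pos) 100 := by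
      show (goB (List.take _mid _lines) r).2 = _
      rw [h1]
    have h2 := ih2 (finalPos (List.take _mid _lines) pos) hp2
    have key : goB (a :: b :: rest) r
        = ((goB (List.take _mid _lines) r).1 + (goB (List.drop _mid _lines) _p1.2).1,
           (goB (List.drop _mid _lines) _p1.2).2) := by
      rw [goB]
    have hsplit : a :: b :: rest = List.take _mid _lines ++ List.drop _mid _lines :=
      (List.take_append_drop _ _).symm
    rw [key, h2, h1]
    conv_rhs => rw [hsplit]
    rw [seLoop_append]
    simp only [finalPos, List.foldl_append]

-- ===== VERDICT =====
theorem secret_entrance_spec : Claim_equal_secret_entrance := by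
  intro input _ _
  unfold Spec_secret_entrance secret_entrance secret_entrance_alt
  rw [goB_spec _ 50 50 (by decide)]
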